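-- pv_equiv track=rewrite | github.com/lpreis/Jurisvis_Anonimizador | anonymizer_core.py | trim_address
-- ===== SOURCE A (Python) =====
-- def trim_address(value: str) -> str:
--     cut_markers = [
--         ", intentou ",
--         ", apresentou ",
--         ", requereu ",
--         ", declarou ",
--         ", celebrou ",
--         ", contra ",
--         ", nos autos ",
--     ]
--     lower = value.casefold()
--     cut_at = len(value)
--     for marker in cut_markers:
--         index = lower.find(marker)
--         if index != -1:
--             cut_at = min(cut_at, index)
--     return value[:cut_at].rstrip(" ,.;")
-- ===== SOURCE B (Python) =====
-- def trim_address(value: str) -> str: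
--     markers = (
--         ", intentou ",
--         ", apresentou ",
--         ", requereu ",
--         ", declarou ",
--         ", celebrou ",
--         ", contra ",
--         ", nos autos ",
--     )
--     lower = value.casefold()
--     cut_at = len(lower)
--     for i in range(len(lower)):
--         if any(lower.startswith(m, i) for m in markers):
--             cut_at = i
--             break
--     return value[:cut_at].rstrip(" ,.;")
-- ===== Notes on version B (the rewrite author's own statement) =====
-- stated objective: alternative
-- what changed: A runs a separate find() scan for each of the 7 markers and takes the min; B makes a single left-to-right pass over positions of the casefolded text and breaks at the first position where any marker starts.
import Mathlib
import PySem

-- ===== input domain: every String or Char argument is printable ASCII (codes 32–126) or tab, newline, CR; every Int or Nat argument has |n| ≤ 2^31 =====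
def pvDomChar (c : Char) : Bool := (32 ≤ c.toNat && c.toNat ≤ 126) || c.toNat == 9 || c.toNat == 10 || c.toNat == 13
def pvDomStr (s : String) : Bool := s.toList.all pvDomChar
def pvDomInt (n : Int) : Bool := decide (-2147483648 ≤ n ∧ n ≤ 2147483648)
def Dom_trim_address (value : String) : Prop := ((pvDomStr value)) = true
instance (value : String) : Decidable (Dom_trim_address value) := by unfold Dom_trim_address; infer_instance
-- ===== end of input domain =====

-- B replaces A's seven separate `find` scans (one per marker, combined with min) by a single
-- left-to-right scan over positions that stops at the first position where any marker starts
-- (objective: alternative — one pass over the text instead of one scan per marker).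
-- value.casefold() is ported as PySem.Chars.lower: on the printable-ASCII domain Dom_trim_address
-- casefold and lower agree character by character.

-- the marker list literal shared by both Python sources
def pvMarkers : List (List Char) :=
  [", intentou ".toList, ", apresentou ".toList, ", requereu ".toList,
   ", declarou ".toList, ", celebrou ".toList, ", contra ".toList, ", nos autos ".toList]

-- hand port of Python's s.rstrip(chars) (PySem has no chars-argument rstrip); exact: drops
-- trailing characters that occur in chars
def pyRstripChars (s chars : List Char) : List Char :=
  (s.reverse.dropWhile (fun c => chars.contains c)).reverse

-- ===== PORT A =====
def trim_address (value : String) : String :=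
  let lower := PySem.Chars.lower value.toList
  let cut_at := pvMarkers.foldl (fun cut marker =>
      let index := PySem.Chars.find lower marker
      if index ≠ -1 then min cut index else cut) ((value.toList.length : Int))
  String.ofList (pyRstripChars (PySem.List.slice value.toList none (some cut_at)) (" ,.;".toList))

-- ===== PORT B =====
-- B's loop 'for i in range(len(lower)): if any(lower.startswith(m, i) …): break' as structural
-- recursion on the suffix: result = first index whose suffix starts with some marker, else length
def pvFirstHit : List Char → Nat
  | [] => 0
  | c :: rest =>
      if pvMarkers.any (fun m => PySem.Chars.startswith (c :: rest) m) then 0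
      else pvFirstHit rest + 1

def trim_address_alt (value : String) : String :=
  let lower := PySem.Chars.lower value.toList
  let cut_at := pvFirstHit lower
  String.ofList (pyRstripChars (PySem.List.slice value.toList none (some (cut_at : Int))) (" ,.;".toList))

-- ===== PRECONDITION & SPEC =====
def Spec_trim_address (value : String) (out : String) : Prop := out = trim_address_alt value
instance (value : String) (out : String) : Decidable (Spec_trim_address value out) := by unfold Spec_trim_address; infer_instance

-- ===== CLAIM (what is proved, stated in full; the proofs are below) =====
def Claim_equal_trim_address : Prop := ∀ (value : String), Dom_trim_address value → Spec_trim_address value (trim_address value)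

-- ===== LEMMAS AND PROOFS =====

-- A's fold, abstracted over the marker list and the initial value
def pvFoldCut (s : List Char) (M : List (List Char)) (init : Int) : Int :=
  M.foldl (fun cut marker =>
      let index := PySem.Chars.find s marker
      if index ≠ -1 then min cut index else cut) init

lemma pvFoldCut_le_init (s : List Char) (M : List (List Char)) (init : Int) :
    pvFoldCut s M init ≤ init := by
  induction M generalizing init with
  | nil => simp [pvFoldCut]
  | cons m M ih =>
      simp only [pvFoldCut, List.foldl_cons]
      refine le_trans (ih _) ?_
      split_ifs <;> simp

lemma pvFoldCut_le_find (s : List Char) (M : List (List Char)) (init : Int)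
    (m : List Char) (hm : m ∈ M) (h : PySem.Chars.find s m ≠ -1) :
    pvFoldCut s M init ≤ PySem.Chars.find s m := by
  induction M generalizing init with
  | nil => simp at hm
  | cons m' M ih =>
      simp only [pvFoldCut, List.foldl_cons]
      rcases List.mem_cons.mp hm with rfl | hm'
      · refine le_trans (pvFoldCut_le_init s M _) ?_
        simp [h]
      · exact ih _ hm'

lemma pvFoldCut_cases (s : List Char) (M : List (List Char)) (init : Int) :
    pvFoldCut s M init = init ∨
      ∃ m ∈ M, PySem.Chars.find s m ≠ -1 ∧ pvFoldCut s M init = PySem.Chars.find s m := by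
  induction M generalizing init with
  | nil => left; simp [pvFoldCut]
  | cons m' M ih =>
      simp only [pvFoldCut, List.foldl_cons]
      rcases ih (if PySem.Chars.find s m' ≠ -1 then min init (PySem.Chars.find s m') else init)
        with h | ⟨m, hm, hf, he⟩
      · by_cases hne : PySem.Chars.find s m' ≠ -1
        · rcases min_cases init (PySem.Chars.find s m') with ⟨hmin, _⟩ | ⟨hmin, _⟩
          · left; simpa [pvFoldCut, hne, hmin] using h
          · right; exact ⟨m', List.mem_cons_self, hne, by simpa [pvFoldCut, hne, hmin] using h⟩
        · left; simpa [pvFoldCut, hne] using h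
      · right; exact ⟨m, List.mem_cons_of_mem _ hm, hf, he⟩

lemma pvFirstHit_le (s : List Char) : pvFirstHit s ≤ s.length := by
  induction s with
  | nil => simp [pvFirstHit]
  | cons c rest ih =>
      simp only [pvFirstHit]
      split_ifs
      · simp
      · simp only [List.length_cons]; omega

lemma pvFirstHit_not_before (s : List Char) (j : Nat) (hj : j < pvFirstHit s) :
    pvMarkers.any (fun m => PySem.Chars.startswith (s.drop j) m) = false := by
  induction s generalizing j with
  | nil => simp [pvFirstHit] at hj
  | cons c rest ih =>
      simp only [pvFirstHit] at hj
      split_ifs at hj with h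
      · omega
      · cases j with
        | zero => simpa using h
        | succ j' => simpa using ih j' (by omega)

lemma pvFirstHit_hit (s : List Char) (h : pvFirstHit s < s.length) :
    pvMarkers.any (fun m => PySem.Chars.startswith (s.drop (pvFirstHit s)) m) = true := by
  induction s with
  | nil => simp at h
  | cons c rest ih =>
      simp only [pvFirstHit] at h ⊢
      split_ifs with hh
      · simpa using hh
      · simp only [hh] at h ⊢
        simpa using ih (by simpa using Nat.lt_of_succ_lt_succ (by simpa [pvFirstHit, hh] using h))

-- the heart of the equivalence: min over the per-marker first occurrences = first position
-- where any marker starts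
lemma pvCut_eq (s : List Char) : pvFoldCut s pvMarkers (s.length : Int) = (pvFirstHit s : Int) := by
  set n := pvFirstHit s with hn
  apply le_antisymm
  · rcases Nat.lt_or_ge n s.length with hlt | hge
    · have hany := pvFirstHit_hit s hlt
      rw [List.any_eq_true] at hany
      obtain ⟨m, hm, hsw⟩ := hany
      have hpre : m <+: s.drop n := (PySem.Chars.startswith_iff _ _).mp hsw
      have hinf : m <:+: s := hpre.isInfix.trans (List.drop_suffix n s).isInfix
      have hne : PySem.Chars.find s m ≠ -1 := (PySem.Chars.find_ne_neg_one_iff s m).mpr hinf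
      have hnn : 0 ≤ PySem.Chars.find s m := by
        have := PySem.Chars.neg_one_le_find s m
        omega
      have hle : PySem.Chars.find s m ≤ (n : Int) := by
        by_contra hgt
        push_neg at hgt
        have hlt' : n < (PySem.Chars.find s m).toNat := by omega
        exact ((PySem.Chars.find_spec (s := s) (sub := m) hnn).2 n hlt') hpre
      exact le_trans (pvFoldCut_le_find s pvMarkers _ m hm hne) hle
    · have : n = s.length := le_antisymm (pvFirstHit_le s) hge
      rw [this]
      exact pvFoldCut_le_init s pvMarkers _
  · rcases pvFoldCut_cases s pvMarkers (s.length : Int) with h | ⟨m, hm, hf, he⟩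
    · rw [h]; exact_mod_cast pvFirstHit_le s
    · rw [he]
      have hnn : 0 ≤ PySem.Chars.find s m := by
        have := PySem.Chars.neg_one_le_find s m
        omega
      have hpre := (PySem.Chars.find_spec (s := s) (sub := m) hnn).1
      by_contra hlt
      push_neg at hlt
      have hjlt : (PySem.Chars.find s m).toNat < n := by omega
      have hfalse := pvFirstHit_not_before s (PySem.Chars.find s m).toNat hjlt
      rw [List.any_eq_false] at hfalse
      exact absurd ((PySem.Chars.startswith_iff _ _).mpr hpre) (by simpa using hfalse m hm)

lemma pvLower_length (s : List Char) : (PySem.Chars.lower s).length = s.length := by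
  simp [PySem.Chars.lower]

-- ===== VERDICT (by name: the statement is the Claim_ definition above) =====
theorem trim_address_spec : Claim_equal_trim_address := by
  intro value _
  unfold Spec_trim_address trim_address trim_address_alt
  have h := pvCut_eq (PySem.Chars.lower value.toList)
  rw [pvLower_length] at h
  simp only []
  rw [show (pvMarkers.foldl (fun cut marker =>
      let index := PySem.Chars.find (PySem.Chars.lower value.toList) marker
      if index ≠ -1 then min cut index else cut) ((value.toList.length : Int)))
      = pvFoldCut (PySem.Chars.lower value.toList) pvMarkers (value.toList.length : Int) from rfl, h]
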